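-- pv_equiv track=rewrite | github.com/criticic/warpspeed25-sarathi | src/agent/graph.py | smart_text_chunking
-- ===== SOURCE A (Python) =====
-- def smart_text_chunking(text, max_length=2400):
--     """Split text into chunks that respect sentence boundaries and stay under max_length."""
--     chunks = []
--     current_chunk = ""
--
--     # Split by sentences first
--     sentences = []
--     temp = text
--     while temp:
--         # Find sentence endings
--         endings = [temp.find('.'), temp.find('!'), temp.find('?')]
--         endings = [e for e in endings if e != -1]
--
--         if not endings:
--             sentences.append(temp)
--             break
--
--         next_end = min(endings) + 1
--         sentences.append(temp[:next_end])
--         temp = temp[next_end:].lstrip()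
--
--     for sentence in sentences:
--         # If adding this sentence would exceed the limit
--         if len(current_chunk) + len(sentence) > max_length:
--             if current_chunk:  # If we have content, save it as a chunk
--                 chunks.append(current_chunk.strip())
--                 current_chunk = sentence
--             else:  # If sentence itself is too long, split it at spaces
--                 words = sentence.split(' ')
--                 for word in words:
--                     if len(current_chunk) + len(word) + 1 > max_length:
--                         if current_chunk:
--                             chunks.append(current_chunk.strip())
--                             current_chunk = word
--                         else:
--                             chunks.append(word)  # Single word longer than limit
--                     else:
--                         current_chunk += (' ' + word if current_chunk else word)
--         else:
--             current_chunk += (' ' + sentence if current_chunk else sentence)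
--
--     if current_chunk:
--         chunks.append(current_chunk.strip())
--
--     return chunks
-- ===== SOURCE B (Python) =====
-- def smart_text_chunking(text, max_length=2400):
--     """Split text into chunks that respect sentence boundaries and stay under max_length.
--
--     Single left-to-right scan over the characters to split sentences (instead of
--     repeated find+slice), then one greedy packing pass.
--     """
--     # One pass: a sentence ends at '.', '!' or '?'; whitespace after a
--     # sentence end is skipped (this is what repeated lstrip() amounts to).
--     sentences = []
--     cur = []
--     skipping = False
--     for ch in text:
--         if skipping and ch.isspace():
--             continue
--         skipping = False
--         cur.append(ch)
--         if ch in '.!?':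
--             sentences.append(''.join(cur))
--             cur = []
--             skipping = True
--     if cur:
--         sentences.append(''.join(cur))
--
--     # Greedy packing of sentences into chunks.
--     chunks = []
--     current = ""
--     for sentence in sentences:
--         if len(current) + len(sentence) <= max_length:
--             current = current + ' ' + sentence if current else sentence
--         elif current:
--             chunks.append(current.strip())
--             current = sentence
--         else:
--             # A lone over-long sentence: fall back to packing its words.
--             for word in sentence.split(' '):
--                 if len(current) + len(word) + 1 > max_length:
--                     if current:
--                         chunks.append(current.strip())
--                         current = word
--                     else:
--                         chunks.append(word)
--                 else:
--                     current = current + ' ' + word if current else word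
--     if current:
--         chunks.append(current.strip())
--     return chunks
-- ===== Notes on version B (the rewrite author's own statement) =====
-- stated objective: alternative
-- what changed: A's sentence splitter repeatedly calls str.find three times on the whole remaining text and re-slices/lstrips it; B records sentence boundaries in a single left-to-right scan over the characters (one pass, no re-slicing), keeping the same greedy packing pass; the scan is asymptotically better in the number of sentences but pays a per-character Python-loop constant, so no speed is claimed.
import Mathlib
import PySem

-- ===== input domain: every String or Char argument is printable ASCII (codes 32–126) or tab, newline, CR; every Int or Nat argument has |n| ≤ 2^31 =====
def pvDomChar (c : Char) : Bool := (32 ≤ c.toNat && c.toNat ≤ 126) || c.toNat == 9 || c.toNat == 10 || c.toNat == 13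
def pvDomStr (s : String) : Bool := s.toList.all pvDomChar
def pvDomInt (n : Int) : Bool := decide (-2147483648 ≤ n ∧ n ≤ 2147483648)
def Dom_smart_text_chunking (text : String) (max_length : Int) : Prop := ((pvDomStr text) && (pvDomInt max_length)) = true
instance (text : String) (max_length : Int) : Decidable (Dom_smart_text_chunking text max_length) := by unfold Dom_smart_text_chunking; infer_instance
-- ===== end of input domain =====

-- B finds the sentence boundaries in one left-to-right character scan instead of
-- A's repeated find+slice+lstrip of the remaining text; the greedy packing pass is kept.

-- ===== PORT A =====
-- A's `while temp:` loop: repeated find of '.', '!', '?', slice, lstrip.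
def pvA_sentences (temp : List Char) : List (List Char) :=
  if hT : temp = [] then []
  else
    match hm : PySem.List.min? (([PySem.Chars.find temp ['.'], PySem.Chars.find temp ['!'],
        PySem.Chars.find temp ['?']]).filter (fun e => e != -1)) (fun e => e) with
    | none => [temp]   -- `if not endings:` — append temp and break
    | some m =>
      PySem.List.slice temp none (some (m + 1)) ::
        pvA_sentences (PySem.Chars.lstrip (PySem.List.slice temp (some (m + 1)) none))
termination_by temp.length
decreasing_by
  have hmem := PySem.List.min?_mem hm
  simp only [List.mem_filter, List.mem_cons, bne_iff_ne, ne_eq,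
    List.not_mem_nil, or_false] at hmem
  have h0 : 0 ≤ m := by
    rcases hmem with ⟨h1 | h1 | h1, h2⟩
    · have := PySem.Chars.neg_one_le_find temp ['.']; omega
    · have := PySem.Chars.neg_one_le_find temp ['!']; omega
    · have := PySem.Chars.neg_one_le_find temp ['?']; omega
  rw [PySem.List.slice_from temp (by omega)]
  have h1 := List.length_dropWhile_le PySem.Chars.isspace (List.drop (m + 1).toNat temp)
  have h2 : 0 < temp.length := List.length_pos_iff.mpr hT
  simp only [PySem.Chars.lstrip]
  have h3 : (m + 1).toNat = m.toNat + 1 := by omega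
  have h4 := List.length_drop (l := temp) (i := (m + 1).toNat)
  omega

-- body of A's `for word in words:` loop
def pvA_wordStep (max_length : Int) (st : List (List Char) × List Char) (word : List Char) :
    List (List Char) × List Char :=
  if (st.2.length : Int) + (word.length : Int) + 1 > max_length then
    if st.2 ≠ [] then (st.1 ++ [PySem.Chars.strip st.2], word)
    else (st.1 ++ [word], st.2)
  else (st.1, if st.2 ≠ [] then st.2 ++ ' ' :: word else word)

-- body of A's `for sentence in sentences:` loop
def pvA_sentStep (max_length : Int) (st : List (List Char) × List Char) (sentence : List Char) :
    List (List Char) × List Char :=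
  if (st.2.length : Int) + (sentence.length : Int) > max_length then
    if st.2 ≠ [] then (st.1 ++ [PySem.Chars.strip st.2], sentence)
    else (PySem.Chars.splitOn sentence [' ']).foldl (pvA_wordStep max_length) st
  else (st.1, if st.2 ≠ [] then st.2 ++ ' ' :: sentence else sentence)

def smart_text_chunking (text : String) (max_length : Int) : List String :=
  let st := (pvA_sentences text.toList).foldl (pvA_sentStep max_length) ([], [])
  (if st.2 ≠ [] then st.1 ++ [PySem.Chars.strip st.2] else st.1).map (fun cs => String.ofList cs)

-- ===== PORT B =====
-- B's single scan: `skipping` skips whitespace after a sentence end.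
def pvB_split (l : List Char) (cur : List Char) (skipping : Bool) : List (List Char) :=
  match l with
  | [] => if cur = [] then [] else [cur]
  | c :: rest =>
    if skipping && PySem.Chars.isspace c then pvB_split rest cur skipping
    else if c == '.' || c == '!' || c == '?' then (cur ++ [c]) :: pvB_split rest [] true
    else pvB_split rest (cur ++ [c]) false

-- B's inner `for word in sentence.split(' '):` loop
def pvB_packWords (max_length : Int) (words : List (List Char)) (current : List Char) :
    List (List Char) × List Char :=
  match words with
  | [] => ([], current)
  | w :: ws =>
    if (current.length : Int) + (w.length : Int) + 1 > max_length then
      if current ≠ [] then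
        let r := pvB_packWords max_length ws w
        (PySem.Chars.strip current :: r.1, r.2)
      else
        let r := pvB_packWords max_length ws current
        (w :: r.1, r.2)
    else pvB_packWords max_length ws (if current = [] then w else current ++ ' ' :: w)

-- B's `for sentence in sentences:` greedy packing loop
def pvB_pack (max_length : Int) (sentences : List (List Char)) (current : List Char) :
    List (List Char) :=
  match sentences with
  | [] => if current = [] then [] else [PySem.Chars.strip current]
  | s :: rest =>
    if (current.length : Int) + (s.length : Int) ≤ max_length then
      pvB_pack max_length rest (if current = [] then s else current ++ ' ' :: s)
    else if current ≠ [] then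
      PySem.Chars.strip current :: pvB_pack max_length rest s
    else
      let r := pvB_packWords max_length (PySem.Chars.splitOn s [' ']) current
      r.1 ++ pvB_pack max_length rest r.2

def smart_text_chunking_alt (text : String) (max_length : Int) : List String :=
  (pvB_pack max_length (pvB_split text.toList [] false) []).map (fun cs => String.ofList cs)

-- ===== PRECONDITION & SPEC =====
def Spec_smart_text_chunking (text : String) (max_length : Int) (out : List String) : Prop := out = smart_text_chunking_alt text max_length
instance (text : String) (max_length : Int) (out : List String) : Decidable (Spec_smart_text_chunking text max_length out) := by unfold Spec_smart_text_chunking; infer_instance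

-- ===== CLAIM (what is proved, stated in full; the proofs are below) =====
def Claim_equal_smart_text_chunking : Prop := ∀ (text : String) (max_length : Int), Dom_smart_text_chunking text max_length → Spec_smart_text_chunking text max_length (smart_text_chunking text max_length)

-- ===== LEMMAS AND PROOFS =====

def pvIsEnder (c : Char) : Bool := c == '.' || c == '!' || c == '?'

lemma pv_prefix_single (c : Char) (l : List Char) : ([c] <+: l) ↔ l.head? = some c := by
  constructor
  · rintro ⟨t, rfl⟩; rfl
  · intro h
    cases l with
    | nil => simp at h
    | cons a t => simp at h; subst h; exact ⟨t, rfl⟩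

lemma pvB_split_noEnder (l : List Char) (cur : List Char)
    (h : ∀ c ∈ l, pvIsEnder c = false) :
    pvB_split l cur false = if cur ++ l = [] then [] else [cur ++ l] := by
  induction l generalizing cur with
  | nil => simp [pvB_split]
  | cons c rest ih =>
    have hc : pvIsEnder c = false := h c (by simp)
    simp only [pvIsEnder] at hc
    rw [pvB_split, if_neg (by simp), if_neg (by simp [hc]),
      ih (cur ++ [c]) (fun x hx => h x (List.mem_cons_of_mem _ hx))]
    simp

lemma pvB_split_skip (l : List Char) :
    pvB_split l [] true = pvB_split (l.dropWhile PySem.Chars.isspace) [] false := by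
  induction l with
  | nil => rfl
  | cons c rest ih =>
    by_cases hs : PySem.Chars.isspace c = true
    · rw [pvB_split, if_pos (by simp [hs]), ih, List.dropWhile_cons_of_pos hs]
    · rw [List.dropWhile_cons_of_neg hs, pvB_split, pvB_split]
      simp [hs]

lemma pvB_split_ender (pre : List Char) (e : Char) (rest : List Char) (cur : List Char)
    (hpre : ∀ x ∈ pre, pvIsEnder x = false) (he : pvIsEnder e = true) :
    pvB_split (pre ++ e :: rest) cur false = (cur ++ pre ++ [e]) :: pvB_split rest [] true := by
  induction pre generalizing cur with
  | nil =>
    simp only [pvIsEnder] at he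
    rw [List.nil_append, pvB_split]
    simp [he]
  | cons a pre' ih =>
    have ha : pvIsEnder a = false := hpre a (by simp)
    simp only [pvIsEnder] at ha
    rw [List.cons_append, pvB_split, if_neg (by simp), if_neg (by simp [ha]),
      ih (cur ++ [a]) (fun x hx => hpre x (List.mem_cons_of_mem _ hx))]
    simp

lemma pv_find_ge (pre : List Char) (e : Char) (rest : List Char) (c : Char)
    (hpre : ∀ x ∈ pre, pvIsEnder x = false) (hc : pvIsEnder c = true) :
    PySem.Chars.find (pre ++ e :: rest) [c] = -1 ∨
      (pre.length : Int) ≤ PySem.Chars.find (pre ++ e :: rest) [c] := by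
  by_cases h : PySem.Chars.find (pre ++ e :: rest) [c] = -1
  · exact Or.inl h
  · right
    have h0 : 0 ≤ PySem.Chars.find (pre ++ e :: rest) [c] := by
      have := PySem.Chars.neg_one_le_find (pre ++ e :: rest) [c]; omega
    obtain ⟨hp, _⟩ := PySem.Chars.find_spec h0
    by_contra hlt
    rw [not_le] at hlt
    set i := (PySem.Chars.find (pre ++ e :: rest) [c]).toNat with hi
    have hilt : i < pre.length := by omega
    rw [pv_prefix_single, List.head?_drop, List.getElem?_append_left hilt] at hp
    have hcmem : c ∈ pre := List.mem_of_getElem? hp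
    rw [hpre c hcmem] at hc
    exact absurd hc (by simp)

lemma pv_find_eq (pre : List Char) (e : Char) (rest : List Char)
    (hpre : ∀ x ∈ pre, pvIsEnder x = false) (he : pvIsEnder e = true) :
    PySem.Chars.find (pre ++ e :: rest) [e] = (pre.length : Int) := by
  have hne : PySem.Chars.find (pre ++ e :: rest) [e] ≠ -1 := by
    intro h
    rw [PySem.Chars.find_eq_neg_one_iff] at h
    exact h ((List.singleton_infix_iff e (pre ++ e :: rest)).mpr (by simp))
  have h0 : 0 ≤ PySem.Chars.find (pre ++ e :: rest) [e] := by
    have := PySem.Chars.neg_one_le_find (pre ++ e :: rest) [e]; omega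
  obtain ⟨hp, hmin⟩ := PySem.Chars.find_spec h0
  rcases pv_find_ge pre e rest e hpre he with h | hge
  · exact absurd h hne
  have hle : (PySem.Chars.find (pre ++ e :: rest) [e]).toNat ≤ pre.length := by
    by_contra hgt
    rw [not_le] at hgt
    exact hmin pre.length hgt (by rw [List.drop_left' rfl]; exact ⟨rest, rfl⟩)
  omega

lemma pv_min?_id_eq (xs : List Int) (pn : Int) (hmem : pn ∈ xs) (hall : ∀ x ∈ xs, pn ≤ x) :
    PySem.List.min? xs (fun e => e) = some pn := by
  have hne : xs ≠ [] := by rintro rfl; simp at hmem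
  match hm : PySem.List.min? xs (fun e => e) with
  | none => exact absurd ((PySem.List.min?_eq_none_iff xs _).mp hm) hne
  | some m =>
    have h1 : pn ≤ m := hall m (PySem.List.min?_mem hm)
    have h2 : m ≤ pn := PySem.List.min?_isMin hm pn hmem
    rw [le_antisymm h2 h1]

def pvFinish (st : List (List Char) × List Char) : List (List Char) :=
  if st.2 ≠ [] then st.1 ++ [PySem.Chars.strip st.2] else st.1

lemma pv_packWords_eq (ml : Int) (ws : List (List Char)) (chunks : List (List Char))
    (current : List Char) :
    ws.foldl (pvA_wordStep ml) (chunks, current) =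
      (chunks ++ (pvB_packWords ml ws current).1, (pvB_packWords ml ws current).2) := by
  induction ws generalizing chunks current with
  | nil => simp [pvB_packWords]
  | cons w ws ih =>
    rw [List.foldl_cons, pvB_packWords]
    by_cases h1 : (current.length : Int) + (w.length : Int) + 1 > ml
    · by_cases h2 : current = []
      · have hA : pvA_wordStep ml (chunks, current) w = (chunks ++ [w], current) := by
          simp only [pvA_wordStep]
          rw [if_pos h1, if_neg (by simp [h2])]
        rw [hA, if_pos h1, if_neg (by simp [h2]), ih]
        simp
      · have hA : pvA_wordStep ml (chunks, current) w =
            (chunks ++ [PySem.Chars.strip current], w) := by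
          simp only [pvA_wordStep]
          rw [if_pos h1, if_pos (by simp [h2])]
        rw [hA, if_pos h1, if_pos h2, ih]
        simp
    · have hA : pvA_wordStep ml (chunks, current) w =
          (chunks, if current = [] then w else current ++ ' ' :: w) := by
        simp only [pvA_wordStep]
        rw [if_neg h1]
        by_cases h2 : current = [] <;> simp [h2]
      rw [hA, if_neg h1, ih]

lemma pv_pack_eq (ml : Int) (sentences : List (List Char)) (chunks : List (List Char))
    (current : List Char) :
    pvFinish (sentences.foldl (pvA_sentStep ml) (chunks, current)) =
      chunks ++ pvB_pack ml sentences current := by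
  induction sentences generalizing chunks current with
  | nil =>
    by_cases h : current = [] <;> simp [pvFinish, pvB_pack, h]
  | cons s rest ih =>
    rw [List.foldl_cons, pvB_pack]
    by_cases h1 : (current.length : Int) + (s.length : Int) ≤ ml
    · have hA : pvA_sentStep ml (chunks, current) s =
          (chunks, if current = [] then s else current ++ ' ' :: s) := by
        simp only [pvA_sentStep]
        rw [if_neg (by exact not_lt.mpr h1)]
        by_cases h2 : current = [] <;> simp [h2]
      rw [hA, if_pos h1, ih]
    · rw [if_neg h1]
      by_cases h2 : current = []
      · have hA : pvA_sentStep ml (chunks, current) s =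
            (PySem.Chars.splitOn s [' ']).foldl (pvA_wordStep ml) (chunks, current) := by
          simp only [pvA_sentStep]
          rw [if_pos (by exact lt_of_not_ge h1), if_neg (by simp [h2])]
        rw [hA, if_neg (by simp [h2]), pv_packWords_eq, ih, h2]
        simp
      · have hA : pvA_sentStep ml (chunks, current) s =
            (chunks ++ [PySem.Chars.strip current], s) := by
          simp only [pvA_sentStep]
          rw [if_pos (by exact lt_of_not_ge h1), if_pos (by simp [h2])]
        rw [hA, if_pos h2, ih]
        simp

lemma pv_sentences_eq_aux : ∀ (n : Nat) (s : List Char), s.length ≤ n →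
    pvA_sentences s = pvB_split s [] false := by
  intro n
  induction n with
  | zero =>
    intro s hs
    have : s = [] := List.length_eq_zero_iff.mp (by omega)
    subst this
    simp [pvA_sentences, pvB_split]
  | succ n ih =>
    intro s hs
    by_cases hT : s = []
    · subst hT
      simp [pvA_sentences, pvB_split]
    set p : Char → Bool := fun c => !pvIsEnder c with hp
    have hsplit := List.takeWhile_append_dropWhile (p := p) (l := s)
    set pre := s.takeWhile p with hpre'
    have hpre : ∀ x ∈ pre, pvIsEnder x = false := by
      intro x hx
      have := List.mem_takeWhile_imp hx
      simpa [hp] using this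
    cases hrest : s.dropWhile p with
    | nil =>
      -- no sentence ender in s
      have hall : ∀ x ∈ s, pvIsEnder x = false := by
        intro x hx
        have := List.dropWhile_eq_nil_iff.mp hrest x hx
        simpa [hp] using this
      have hfind : ∀ c : Char, pvIsEnder c = true → PySem.Chars.find s [c] = -1 := by
        intro c hc
        rw [PySem.Chars.find_eq_neg_one_iff, List.singleton_infix_iff]
        intro hmem
        rw [hall c hmem] at hc
        exact absurd hc (by simp)
      have hd : PySem.Chars.find s ['.'] = -1 := hfind '.' (by decide)
      have hb : PySem.Chars.find s ['!'] = -1 := hfind '!' (by decide)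
      have hq : PySem.Chars.find s ['?'] = -1 := hfind '?' (by decide)
      rw [pvB_split_noEnder s [] hall, if_neg (by simpa using hT)]
      rw [pvA_sentences, dif_neg hT]
      split
      · rfl
      · next m heq =>
        have heq' : PySem.List.min? (List.filter (fun e => e != -1)
            [PySem.Chars.find s ['.'], PySem.Chars.find s ['!'], PySem.Chars.find s ['?']])
            (fun e => e) = some m := heq
        rw [hd, hb, hq] at heq'
        simp [PySem.List.min?] at heq'
    | cons e rest =>
      have hs_eq : s = pre ++ e :: rest := by rw [hrest] at hsplit; exact hsplit.symm
      have hdw : s.dropWhile p ≠ [] := by rw [hrest]; simp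
      have he : pvIsEnder e = true := by
        have h1 := List.head_dropWhile_not p hdw
        have h2 : (s.dropWhile p).head hdw = e := by
          simp only [hrest, List.head_cons]
        rw [h2] at h1
        simpa [hp] using h1
      have hfd := pv_find_ge pre e rest '.' hpre (by decide)
      have hfb := pv_find_ge pre e rest '!' hpre (by decide)
      have hfq := pv_find_ge pre e rest '?' hpre (by decide)
      have hfe := pv_find_eq pre e rest hpre he
      rw [← hs_eq] at hfd hfb hfq hfe
      set pn := pre.length with hpn
      have hone : PySem.Chars.find s ['.'] = (pn : Int) ∨
          PySem.Chars.find s ['!'] = (pn : Int) ∨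
          PySem.Chars.find s ['?'] = (pn : Int) := by
        have he' : e = '.' ∨ e = '!' ∨ e = '?' := by
          revert he
          simp only [pvIsEnder, Bool.or_eq_true, beq_iff_eq]
          tauto
        rcases he' with rfl | rfl | rfl
        · exact Or.inl hfe
        · exact Or.inr (Or.inl hfe)
        · exact Or.inr (Or.inr hfe)
      have hminv : PySem.List.min? (List.filter (fun e => e != -1)
          [PySem.Chars.find s ['.'], PySem.Chars.find s ['!'], PySem.Chars.find s ['?']])
          (fun e => e) = some (pn : Int) := by
        apply pv_min?_id_eq
        · rw [List.mem_filter]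
          refine ⟨?_, by simp⟩
          rcases hone with h | h | h <;> simp [← h]
        · intro x hx
          rw [List.mem_filter] at hx
          obtain ⟨hx1, hx2⟩ := hx
          have hx2' : x ≠ -1 := by simpa using hx2
          simp only [List.mem_cons, List.not_mem_nil, or_false] at hx1
          rcases hx1 with rfl | rfl | rfl <;> omega
      rw [pvA_sentences, dif_neg hT]
      split
      · next heq =>
        have heq' : PySem.List.min? (List.filter (fun e => e != -1)
            [PySem.Chars.find s ['.'], PySem.Chars.find s ['!'], PySem.Chars.find s ['?']])
            (fun e => e) = none := heq
        rw [hminv] at heq'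
        exact absurd heq' (by simp)
      · next m heq =>
        have heq' : PySem.List.min? (List.filter (fun e => e != -1)
            [PySem.Chars.find s ['.'], PySem.Chars.find s ['!'], PySem.Chars.find s ['?']])
            (fun e => e) = some m := heq
        rw [hminv] at heq'
        have hm : m = (pn : Int) := (Option.some_inj.mp heq').symm
        subst hm
        have htake : PySem.List.slice s none (some ((pn : Int) + 1)) = pre ++ [e] := by
          rw [PySem.List.slice_to _ (by omega)]
          have h1 : ((pn : Int) + 1).toNat = pn + 1 := by omega
          have h2 : s = (pre ++ [e]) ++ rest := by rw [hs_eq]; simp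
          rw [h1, h2, List.take_left' (by simp [hpn])]
        have hdrop : PySem.List.slice s (some ((pn : Int) + 1)) none = rest := by
          rw [PySem.List.slice_from _ (by omega)]
          have h1 : ((pn : Int) + 1).toNat = pn + 1 := by omega
          have h2 : s = (pre ++ [e]) ++ rest := by rw [hs_eq]; simp
          rw [h1, h2, List.drop_left' (by simp [hpn])]
        rw [htake, hdrop]
        have hlen : (PySem.Chars.lstrip rest).length ≤ n := by
          have h1 : (PySem.Chars.lstrip rest).length ≤ rest.length :=
            List.length_dropWhile_le _ _
          have h2 : s.length = pre.length + (rest.length + 1) := by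
            rw [hs_eq]; simp
          omega
        rw [ih _ hlen, hs_eq, pvB_split_ender pre e rest [] hpre he, pvB_split_skip]
        simp [PySem.Chars.lstrip]

lemma pv_sentences_eq (s : List Char) : pvA_sentences s = pvB_split s [] false :=
  pv_sentences_eq_aux s.length s le_rfl

-- ===== VERDICT (by name: the statement is the Claim_ definition above) =====
theorem smart_text_chunking_spec : Claim_equal_smart_text_chunking := by
  unfold Claim_equal_smart_text_chunking
  intro text max_length _
  unfold Spec_smart_text_chunking smart_text_chunking smart_text_chunking_alt
  rw [pv_sentences_eq]
  show (pvFinish (List.foldl (pvA_sentStep max_length) ([], [])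
      (pvB_split text.toList [] false))).map (fun cs => String.ofList cs) = _
  rw [pv_pack_eq max_length (pvB_split text.toList [] false) [] []]
  rfl
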